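-- pv_equiv track=rewrite | github.com/darrenyaoyao/RE-Dream-of-the-Red | DataManager.py | POS_dic
-- ===== SOURCE A (Python) =====
-- def POS_dic(parses):
--     idx = 0
--     pos_dic = {}
--     for parse in parses:
--         for POS in parse:
--             if POS not in pos_dic:
--                 pos_dic[POS] = idx
--                 idx += 1
--     return pos_dic
-- ===== SOURCE B (Python) =====
-- def POS_dic(parses):
--     flat = [pos for parse in parses for pos in parse]
--     first = {pos: i for i, pos in reversed(list(enumerate(flat)))}
--     order = sorted(first, key=first.get)
--     return {pos: i for i, pos in enumerate(order)}
-- ===== Notes on version B (the rewrite author's own statement) =====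
-- stated objective: alternative
-- what changed: B replaces A's single-pass membership-check-plus-counter loop with a sort-based pipeline: build a first-occurrence-index map by overwriting inserts over the reversed enumerated flat token stream (no membership test), sort the keys by that first index, and enumerate the sorted keys.
import Mathlib
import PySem

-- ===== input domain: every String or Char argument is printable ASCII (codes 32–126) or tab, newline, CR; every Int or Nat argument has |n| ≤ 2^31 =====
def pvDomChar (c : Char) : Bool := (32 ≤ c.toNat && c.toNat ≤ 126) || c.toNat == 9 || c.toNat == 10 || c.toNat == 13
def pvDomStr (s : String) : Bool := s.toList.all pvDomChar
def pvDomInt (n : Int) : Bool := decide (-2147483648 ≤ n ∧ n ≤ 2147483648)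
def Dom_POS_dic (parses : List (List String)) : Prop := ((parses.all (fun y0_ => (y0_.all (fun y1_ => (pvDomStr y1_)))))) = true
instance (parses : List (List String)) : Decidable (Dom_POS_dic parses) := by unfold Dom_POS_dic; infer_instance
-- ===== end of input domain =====

-- B replaces A's membership-check-plus-counter loop with a sort-based pipeline
-- (first-occurrence map via reversed overwriting inserts, sort keys by that index,
-- enumerate); alternative algorithm, similar cost.


-- ===== PORT A =====
-- idx = 0; pos_dic = {}; for parse in parses: for POS in parse: if POS not in pos_dic: pos_dic[POS] = idx; idx += 1
def POS_dic (parses : List (List String)) : List (String × Int) :=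
  let st := parses.foldl
    (fun (st : Int × PySem.Dict String Int) parse =>
      parse.foldl
        (fun st POS =>
          if !(st.2.contains POS) then (st.1 + 1, st.2.insert POS st.1) else st)
        st)
    (0, PySem.Dict.empty)
  st.2.items

-- ===== PORT B =====
-- flat = [pos for parse in parses for pos in parse]
-- first = {pos: i for i, pos in reversed(list(enumerate(flat)))}   (overwrite: last write = smallest i)
-- order = sorted(first, key=first.get)     (first.get pos is the stored int; ported as getD _ 0, every key is present)
-- return {pos: i for i, pos in enumerate(order)}
def POS_dic_alt (parses : List (List String)) : List (String × Int) :=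
  let flat := parses.flatMap (fun parse => parse)
  let first := ((PySem.List.enumerate flat).reverse).foldl
      (fun (d : PySem.Dict String Int) p => d.insert p.2 p.1) PySem.Dict.empty
  let order := PySem.List.sorted first.keys (fun pos => first.getD pos 0)
  ((PySem.List.enumerate order).foldl
      (fun (d : PySem.Dict String Int) p => d.insert p.2 p.1) PySem.Dict.empty).items

-- ===== PRECONDITION & SPEC =====
def Spec_POS_dic (parses : List (List String)) (out : List (String × Int)) : Prop := out = POS_dic_alt parses
instance (parses : List (List String)) (out : List (String × Int)) : Decidable (Spec_POS_dic parses out) := by unfold Spec_POS_dic; infer_instance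

-- ===== CLAIM (what is proved, stated in full; the proofs are below) =====
def Claim_equal_POS_dic : Prop := ∀ (parses : List (List String)), Dom_POS_dic parses → Spec_POS_dic parses (POS_dic parses)

-- ===== LEMMAS AND PROOFS =====

-- the (pos, index) pairs both sides ultimately build from an ordered unique list
def pvPairs (u : List String) : List (String × Int) :=
  (PySem.List.enumerate u).map (fun p => (p.2, p.1))

theorem pvPairs_keys (u : List String) : (pvPairs u).map (·.1) = u := by
  unfold pvPairs
  rw [List.map_map]
  exact PySem.List.map_snd_enumerate u 0

theorem pvPairs_append (u : List String) (x : String) :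
    pvPairs (u ++ [x]) = pvPairs u ++ [(x, (u.length : Int))] := by
  simp [pvPairs, PySem.List.enumerate_append, PySem.List.enumerate_cons]

-- A's loop body
def pvStep (st : Int × PySem.Dict String Int) (POS : String) : Int × PySem.Dict String Int :=
  if !(st.2.contains POS) then (st.1 + 1, st.2.insert POS st.1) else st

theorem pvContains_pairs (u : List String) (x : String) :
    (PySem.Dict.mk (pvPairs u)).contains x = true ↔ x ∈ u := by
  rw [PySem.Dict.contains_iff_mem_keys]
  show x ∈ (pvPairs u).map (·.1) ↔ x ∈ u
  rw [pvPairs_keys]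

-- invariant of A's loop over the flattened token stream
theorem pvState (xs : List String) :
    xs.foldl pvStep (0, PySem.Dict.empty) =
      (((PySem.List.dedup xs).length : Int), PySem.Dict.mk (pvPairs (PySem.List.dedup xs))) := by
  induction xs using List.reverseRecOn with
  | nil => rfl
  | append_singleton xs x ih =>
    rw [List.foldl_append, ih]
    have hded : PySem.List.dedup (xs ++ [x]) = PySem.Set.add (PySem.List.dedup xs) x := by
      simp [PySem.Set.ofList_append_singleton]
    by_cases hx : x ∈ PySem.List.dedup xs
    · have hc : (PySem.Dict.mk (pvPairs (PySem.List.dedup xs))).contains x = true :=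
        (pvContains_pairs _ _).mpr hx
      have hs : PySem.Set.add (PySem.List.dedup xs) x = PySem.List.dedup xs := by
        simp [PySem.Set.add]
        exact (PySem.List.mem_dedup xs x).mp hx
      rw [List.foldl_cons, List.foldl_nil]
      show pvStep _ x = _
      unfold pvStep
      rw [hc]
      have h2 : PySem.Set.ofList (xs ++ [x]) = PySem.Set.ofList xs := by
        simpa using hded.trans hs
      simp [h2]
    · have hc : (PySem.Dict.mk (pvPairs (PySem.List.dedup xs))).contains x = false := by
        rw [Bool.eq_false_iff]
        intro h; exact hx ((pvContains_pairs _ _).mp h)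
      have hs : PySem.Set.add (PySem.List.dedup xs) x = PySem.List.dedup xs ++ [x] := by
        simp [PySem.Set.add]
        exact fun hm => hx ((PySem.List.mem_dedup xs x).mpr hm)
      have hins : (PySem.Dict.mk (pvPairs (PySem.List.dedup xs))).insert x
            ((PySem.List.dedup xs).length : Int) =
          PySem.Dict.mk (pvPairs (PySem.List.dedup xs) ++ [(x, ((PySem.List.dedup xs).length : Int))]) := by
        apply PySem.Dict.ext
        rw [PySem.Dict.items_insert, hc]
        simp
      rw [List.foldl_cons, List.foldl_nil]
      show pvStep _ x = _
      unfold pvStep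
      rw [hc]
      simp only [Bool.not_false, if_true]
      rw [hded, hs, pvPairs_append, hins]
      simp

-- ---- B-side lemmas ----

-- B's dict-building step (insert pair (i, pos) as pos ↦ i)
def pvIns (d : PySem.Dict String Int) (p : Int × String) : PySem.Dict String Int :=
  d.insert p.2 p.1

-- first = fold of pvIns over the reversed enumeration
theorem pvRevFold_cons (x : String) (xs : List String) (s : Int) (d : PySem.Dict String Int) :
    ((PySem.List.enumerate (x :: xs) s).reverse).foldl pvIns d =
      (((PySem.List.enumerate xs (s + 1)).reverse).foldl pvIns d).insert x s := by
  rw [PySem.List.enumerate_cons, List.reverse_cons, List.foldl_append]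
  rfl

theorem pvDict_get?_some_iff_contains {d : PySem.Dict String Int} {k : String} :
    (d.get? k).isSome = d.contains k := by
  show (Option.map _ (List.find? _ d.items)).isSome = d.items.any _
  rw [Option.isSome_map]
  induction d.items with
  | nil => rfl
  | cons p l ih =>
    rw [List.find?_cons, List.any_cons]
    by_cases hp : (p.1 == k) = true
    · simp [hp]
    · simp [hp, ih]

theorem pvKeys_insert (d : PySem.Dict String Int) (k : String) (v : Int) :
    (d.insert k v).keys = if d.contains k then d.keys else d.keys ++ [k] := by
  show ((d.insert k v).items).map (·.1) = _
  rw [PySem.Dict.items_insert]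
  by_cases h : d.contains k
  · simp only [h, if_true, List.map_map]
    apply List.map_congr_left
    intro p _
    by_cases hp : p.1 = k
    · simp [hp]
    · simp [hp]
  · simp [h, PySem.Dict.keys]

-- value stored by first: the first-occurrence index, shifted by the start s
theorem pvFirst_get? (xs : List String) (s : Int) (d : PySem.Dict String Int) (k : String) :
    (((PySem.List.enumerate xs s).reverse).foldl pvIns d).get? k =
      if k ∈ xs then some (s + (List.idxOf k xs : Int)) else d.get? k := by
  induction xs generalizing s d with
  | nil => simp [PySem.List.enumerate]
  | cons x xs ih =>
    rw [pvRevFold_cons]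
    by_cases hk : k = x
    · subst hk
      rw [PySem.Dict.get?_insert_self]
      simp [List.idxOf_cons_self]
    · rw [PySem.Dict.get?_insert_of_ne _ _ hk, ih]
      by_cases hm : k ∈ xs
      · have : List.idxOf k (x :: xs) = List.idxOf k xs + 1 := by
          simp [Ne.symm hk]
        simp only [hm, if_true, List.mem_cons, hk, false_or, this]
        push_cast; ring_nf
      · have : k ∉ x :: xs := by simp [hk, hm]
        simp [hm, this]

-- membership in first's keys
theorem pvFirst_mem_keys (xs : List String) (s : Int) (k : String) :
    (k ∈ (((PySem.List.enumerate xs s).reverse).foldl pvIns PySem.Dict.empty).keys) ↔ k ∈ xs := by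
  rw [← PySem.Dict.contains_iff_mem_keys, ← pvDict_get?_some_iff_contains, pvFirst_get?]
  by_cases hm : k ∈ xs <;> simp [hm, PySem.Dict.get?, PySem.Dict.empty]

-- first's keys are nodup
theorem pvFirst_keys_nodup (xs : List String) (s : Int) (d : PySem.Dict String Int)
    (hd : d.keys.Nodup) :
    ((((PySem.List.enumerate xs s).reverse).foldl pvIns d).keys).Nodup := by
  induction xs generalizing s d with
  | nil => simpa [PySem.List.enumerate] using hd
  | cons x xs ih =>
    rw [pvRevFold_cons, pvKeys_insert]
    by_cases h : (((PySem.List.enumerate xs (s+1)).reverse).foldl pvIns d).contains x = true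
    · simp only [h, if_true]
      exact ih (s+1) d hd
    · have hnx : x ∉ (((PySem.List.enumerate xs (s+1)).reverse).foldl pvIns d).keys := by
        intro hmem
        exact absurd ((PySem.Dict.contains_iff_mem_keys _ _).mpr hmem) h
      rw [Bool.not_eq_true] at h
      simp only [h, Bool.false_eq_true, if_false]
      rw [List.nodup_append]
      exact ⟨ih (s+1) d hd, List.nodup_singleton x, by intro a ha b hb he; rw [List.mem_singleton] at hb; exact hnx (hb ▸ he ▸ ha)⟩

-- dedup is strictly increasing in first-occurrence index
theorem pvDedup_pairwise_idxOf (xs : List String) :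
    (PySem.List.dedup xs).Pairwise (fun a b => List.idxOf a xs < List.idxOf b xs) := by
  induction xs using List.reverseRecOn with
  | nil => simp [PySem.List.dedup, PySem.Set.ofList]
  | append_singleton xs x ih =>
    have hded : PySem.List.dedup (xs ++ [x]) = PySem.Set.add (PySem.List.dedup xs) x := by
      simp [PySem.Set.ofList_append_singleton]
    have hidx : ∀ b ∈ PySem.List.dedup xs, List.idxOf b (xs ++ [x]) = List.idxOf b xs := by
      intro b hb
      have : b ∈ xs := (PySem.List.mem_dedup xs b).mp hb
      rw [List.idxOf_append]
      simp [this]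
    by_cases hx : x ∈ xs
    · have hadd : PySem.Set.add (PySem.List.dedup xs) x = PySem.List.dedup xs := by
        simp [PySem.Set.add]
        exact hx
      rw [hded, hadd]
      exact (List.Pairwise.imp_of_mem (fun {a b} ha hb h => by
        rw [hidx a ha, hidx b hb]; exact h) ih)
    · have hadd : PySem.Set.add (PySem.List.dedup xs) x = PySem.List.dedup xs ++ [x] := by
        simp [PySem.Set.add]
        exact hx
      rw [hded, hadd, List.pairwise_append]
      refine ⟨(List.Pairwise.imp_of_mem (fun {a b} ha hb h => by
        rw [hidx a ha, hidx b hb]; exact h) ih), List.pairwise_singleton _ _, ?_⟩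
      intro a ha b hb
      rw [List.mem_singleton] at hb
      subst hb
      have hax : a ∈ xs := (PySem.List.mem_dedup xs a).mp ha
      rw [hidx a ha, List.idxOf_append]
      simp only [hx, if_false]
      have h1 : List.idxOf a xs < xs.length := List.idxOf_lt_length_of_mem hax
      omega

-- the sorted key list IS the first-occurrence dedup order
theorem pvOrder_eq_dedup (flat : List String) :
    PySem.List.sorted
      ((((PySem.List.enumerate flat 0).reverse).foldl pvIns PySem.Dict.empty).keys)
      (fun pos =>
        (((PySem.List.enumerate flat 0).reverse).foldl pvIns PySem.Dict.empty).getD pos 0) =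
      PySem.List.dedup flat := by
  set first := ((PySem.List.enumerate flat 0).reverse).foldl pvIns PySem.Dict.empty with hfirst
  apply PySem.List.sorted_eq_of_perm_of_pairwise_lt
  · -- dedup flat ~ first.keys
    have h1 : (PySem.List.dedup flat).Nodup := PySem.Set.nodup_ofList flat
    have h2 : first.keys.Nodup := pvFirst_keys_nodup flat 0 PySem.Dict.empty (by
      show (List.map _ ([] : List (String × Int))).Nodup; simp)
    rw [List.perm_ext_iff_of_nodup h1 h2]
    intro a
    rw [PySem.List.mem_dedup, hfirst, pvFirst_mem_keys]
  · -- dedup flat is pairwise increasing under the stored index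
    have hget : ∀ a ∈ PySem.List.dedup flat, first.getD a 0 = (List.idxOf a flat : Int) := by
      intro a ha
      have hm : a ∈ flat := (PySem.List.mem_dedup flat a).mp ha
      have := pvFirst_get? flat 0 PySem.Dict.empty a
      rw [if_pos hm] at this
      show (first.get? a).getD 0 = _
      rw [hfirst, this]
      simp
    exact (List.Pairwise.imp_of_mem (fun {a b} ha hb h => by
      rw [hget a ha, hget b hb]
      exact_mod_cast h) (pvDedup_pairwise_idxOf flat))

-- a dict built from an enumeration of a nodup list has exactly the swapped pairs as items
theorem pvBuild_items (u : List String) (hu : u.Nodup) :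
    (((PySem.List.enumerate u 0).foldl pvIns PySem.Dict.empty).items) = pvPairs u := by
  suffices h : ∀ (v : List String), v.Nodup →
      (((PySem.List.enumerate v 0).foldl pvIns PySem.Dict.empty).items) = pvPairs v from h u hu
  intro v hv
  induction v using List.reverseRecOn with
  | nil => rfl
  | append_singleton xs x ih =>
    rw [List.nodup_append] at hv
    obtain ⟨hxs, -, hdisj⟩ := hv
    have hnx : x ∉ xs := fun hm => hdisj x hm x (List.mem_singleton_self x) rfl
    have hd : List.foldl pvIns PySem.Dict.empty (PySem.List.enumerate xs) =
        PySem.Dict.mk (pvPairs xs) := PySem.Dict.ext (ih hxs)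
    rw [PySem.List.enumerate_append, List.foldl_append, hd]
    have hone : PySem.List.enumerate [x] ((0:Int) + xs.length) = [((0:Int) + (xs.length:Int), x)] := by
      simp [PySem.List.enumerate]
    rw [hone]
    show ((PySem.Dict.mk (pvPairs xs)).insert x ((0:Int) + xs.length)).items = _
    have hc : (PySem.Dict.mk (pvPairs xs)).contains x = false := by
      rw [Bool.eq_false_iff]
      intro h; exact hnx ((pvContains_pairs _ _).mp h)
    rw [PySem.Dict.items_insert, hc]
    simp only [Bool.false_eq_true, if_false]
    rw [pvPairs_append]
    show pvPairs xs ++ [(x, 0 + (xs.length:Int))] = _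
    norm_num

-- ===== VERDICT (by name: the statement is the Claim_ definition above) =====
theorem POS_dic_spec : Claim_equal_POS_dic := by
  intro parses _
  show POS_dic parses = POS_dic_alt parses
  unfold POS_dic POS_dic_alt
  have hflat : parses.flatMap (fun parse => parse) = parses.flatten := by simp
  rw [← List.foldl_flatten]
  show (parses.flatten.foldl pvStep (0, PySem.Dict.empty)).2.items = _
  rw [pvState, hflat]
  show pvPairs (PySem.List.dedup parses.flatten) =
    (List.foldl pvIns PySem.Dict.empty (PySem.List.enumerate (PySem.List.sorted
      ((List.foldl pvIns PySem.Dict.empty (PySem.List.enumerate parses.flatten).reverse).keys)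
      (fun pos =>
        (List.foldl pvIns PySem.Dict.empty
          (PySem.List.enumerate parses.flatten).reverse).getD pos 0)))).items
  rw [pvOrder_eq_dedup]
  exact (pvBuild_items _ (PySem.Set.nodup_ofList _)).symm
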